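-- pv_equiv track=rewrite | github.com/shayro9/AIR_robots_sim | Hanoi_sim.py | is_valid_hanoi_state
-- ===== SOURCE A (Python) =====
-- def is_valid_hanoi_state(state):
--     if not (isinstance(state, list) and len(state) == 3 and all(isinstance(peg, list) for peg in state)):
--         return False
--
--     all_rings = set()
--     for peg in state:
--         if peg != sorted(peg, reverse=True):
--             return False
--         all_rings.update(peg)
--
--     return all_rings.issubset({1, 2, 3, 4}) and len(all_rings) == 4
-- ===== SOURCE B (Python) =====
-- def is_valid_hanoi_state(state):
--     if not (isinstance(state, list) and len(state) == 3 and all(isinstance(peg, list) for peg in state)):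
--         return False
--     ordered = all(a >= b for peg in state for a, b in zip(peg, peg[1:]))
--     in_range = all(1 <= r <= 4 for peg in state for r in peg)
--     covered = all(any(r in peg for peg in state) for r in range(1, 5))
--     return ordered and in_range and covered
-- ===== Notes on version B (the rewrite author's own statement) =====
-- stated objective: idiomatic
-- what changed: Replaces A's per-peg sort-and-compare plus incrementally built ring set by three direct declarative checks: an adjacent-pairs non-increasing scan, a 1..4 range test on every ring, and a membership test that each of 1..4 occurs on some peg (no sorting, no set).
import Mathlib
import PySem

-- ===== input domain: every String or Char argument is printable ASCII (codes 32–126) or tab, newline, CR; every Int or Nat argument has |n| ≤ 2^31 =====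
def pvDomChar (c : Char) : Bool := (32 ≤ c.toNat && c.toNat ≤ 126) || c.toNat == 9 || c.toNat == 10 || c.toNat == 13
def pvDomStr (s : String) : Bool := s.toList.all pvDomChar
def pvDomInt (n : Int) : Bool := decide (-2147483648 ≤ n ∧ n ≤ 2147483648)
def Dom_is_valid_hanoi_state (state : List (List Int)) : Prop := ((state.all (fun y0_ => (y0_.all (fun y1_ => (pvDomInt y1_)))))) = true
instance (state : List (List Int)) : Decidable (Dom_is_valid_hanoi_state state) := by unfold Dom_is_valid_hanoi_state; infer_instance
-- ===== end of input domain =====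

-- B replaces A's per-peg sort-and-compare and ring set by one adjacent-pairs scan plus direct
-- range / coverage membership tests (objective: idiomatic; no speed claim).

-- ===== PORT A =====
-- the 'for peg in state' loop with its early 'return False'; none = early return
def pvAloop : List (List Int) → PySem.Set Int → Option (PySem.Set Int)
  | [], rings => some rings
  | peg :: rest, rings =>
      if peg = PySem.List.sorted peg (fun x => x) true then
        pvAloop rest (PySem.Set.update rings peg)
      else none

def is_valid_hanoi_state (state : List (List Int)) : Bool :=
  -- 'isinstance(state, list)' and 'isinstance(peg, list)' are always true under the type convention
  if state.length = 3 then
    match pvAloop state PySem.Set.empty with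
    | none => false
    | some all_rings =>
        PySem.Set.issubset all_rings (PySem.Set.ofList [1, 2, 3, 4]) &&
          (PySem.Set.len all_rings == 4)
  else false

-- ===== PORT B =====
def is_valid_hanoi_state_alt (state : List (List Int)) : Bool :=
  if state.length = 3 then
    let ordered := state.all (fun peg => (peg.zip (peg.drop 1)).all (fun ab => decide (ab.2 ≤ ab.1)))
    let in_range := state.all (fun peg => peg.all (fun r => decide (1 ≤ r) && decide (r ≤ 4)))
    let covered := (PySem.List.pyRange 1 5 1).all (fun r => state.any (fun peg => peg.contains r))
    ordered && in_range && covered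
  else false

-- ===== PRECONDITION & SPEC =====
def Spec_is_valid_hanoi_state (state : List (List Int)) (out : Bool) : Prop := out = is_valid_hanoi_state_alt state
instance (state : List (List Int)) (out : Bool) : Decidable (Spec_is_valid_hanoi_state state out) := by unfold Spec_is_valid_hanoi_state; infer_instance

-- ===== CLAIM (what is proved, stated in full; the proofs are below) =====
def Claim_equal_is_valid_hanoi_state : Prop := ∀ (state : List (List Int)), Dom_is_valid_hanoi_state state → Spec_is_valid_hanoi_state state (is_valid_hanoi_state state)

-- ===== LEMMAS AND PROOFS =====

-- a peg equals its descending sort iff it is pairwise non-increasing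
lemma peg_sorted_iff (peg : List Int) :
    peg = PySem.List.sorted peg (fun x => x) true ↔ peg.Pairwise (fun a b => b ≤ a) := by
  constructor
  · intro h
    have := PySem.List.sorted_pairwise_rev peg (fun x => x)
    rwa [← h] at this
  · intro h
    exact (PySem.List.sorted_rev_eq_self_of_pairwise peg (fun x => x) h).symm

-- B's adjacent-pairs scan decides the same pairwise-non-increasing property
lemma zip_all_iff (peg : List Int) :
    ((peg.zip (peg.drop 1)).all (fun ab => decide (ab.2 ≤ ab.1)) = true)
      ↔ peg.Pairwise (fun a b => b ≤ a) := by
  induction peg with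
  | nil => simp
  | cons a t ih =>
    cases t with
    | nil => simp
    | cons b u =>
      simp only [List.drop_succ_cons, List.drop_zero, List.zip_cons_cons, List.all_cons,
        Bool.and_eq_true, decide_eq_true_eq] at ih ⊢
      rw [ih]
      constructor
      · rintro ⟨hba, hp⟩
        refine List.pairwise_cons.2 ⟨fun x hx => ?_, hp⟩
        rcases List.mem_cons.1 hx with h | h
        · exact h ▸ hba
        · exact le_trans ((List.pairwise_cons.1 hp).1 x h) hba
      · intro h
        obtain ⟨h1, hp⟩ := List.pairwise_cons.1 h
        exact ⟨h1 b List.mem_cons_self, hp⟩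

-- A's loop in closed form
lemma pvAloop_spec (l : List (List Int)) (s : PySem.Set Int) :
    pvAloop l s =
      if l.all (fun peg => decide (peg = PySem.List.sorted peg (fun x => x) true)) then
        some (PySem.Set.update s l.flatten)
      else none := by
  induction l generalizing s with
  | nil => simp [pvAloop]
  | cons peg rest ih =>
    simp only [pvAloop, List.all_cons, List.flatten_cons]
    by_cases h : peg = PySem.List.sorted peg (fun x => x) true
    · rw [if_pos h, ih]
      have hd : decide (peg = PySem.List.sorted peg (fun x => x) true) = true := decide_eq_true h
      simp [hd, PySem.Set.update_append]
    · simp [h]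

-- the final set condition, restated over the raw (concatenated) ring list
lemma set_cond_iff (R : List Int) :
    ((PySem.Set.issubset (PySem.Set.ofList R) (PySem.Set.ofList [1, 2, 3, 4]) &&
        (PySem.Set.len (PySem.Set.ofList R) == 4)) = true)
      ↔ ((∀ r ∈ R, 1 ≤ r ∧ r ≤ 4) ∧ (∀ k ∈ ([1, 2, 3, 4] : List Int), k ∈ R)) := by
  have hmem4 : ∀ x : Int, x ∈ ([1, 2, 3, 4] : List Int) ↔ (1 ≤ x ∧ x ≤ 4) := by
    intro x; simp; omega
  have hsub : (PySem.Set.issubset (PySem.Set.ofList R) (PySem.Set.ofList [1, 2, 3, 4]) = true)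
      ↔ ∀ r ∈ R, 1 ≤ r ∧ r ≤ 4 := by
    rw [PySem.Set.issubset_iff]
    constructor
    · intro h r hr
      have := h r ((PySem.Set.mem_ofList R r).2 hr)
      rw [PySem.Set.mem_ofList, hmem4] at this; exact this
    · intro h x hx
      rw [PySem.Set.mem_ofList] at hx ⊢
      rw [hmem4]; exact h x hx
  have hlen : ((PySem.Set.len (PySem.Set.ofList R) == 4) = true)
      ↔ (PySem.Set.ofList R).length = 4 := by
    simp [PySem.Set.len]; omega
  have hnodup := PySem.Set.nodup_ofList (xs := R)
  have hnodup4 : ([1, 2, 3, 4] : List Int).Nodup := by decide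
  rw [Bool.and_eq_true, hsub, hlen]
  constructor
  · rintro ⟨hb, h2⟩
    refine ⟨hb, ?_⟩
    have hsubl : (PySem.Set.ofList R) ⊆ ([1, 2, 3, 4] : List Int) := by
      intro x hx
      rw [PySem.Set.mem_ofList] at hx
      exact (hmem4 x).2 (hb x hx)
    have hsp : List.Subperm (PySem.Set.ofList R) ([1, 2, 3, 4] : List Int) :=
      hnodup.subperm hsubl
    have hperm : List.Perm (PySem.Set.ofList R) ([1, 2, 3, 4] : List Int) :=
      hsp.perm_of_length_le (by simp [h2])
    intro k hk
    exact (PySem.Set.mem_ofList R k).1 (hperm.mem_iff.2 hk)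
  · rintro ⟨hb, hc⟩
    refine ⟨hb, ?_⟩
    have hsubl : (PySem.Set.ofList R) ⊆ ([1, 2, 3, 4] : List Int) := by
      intro x hx
      rw [PySem.Set.mem_ofList] at hx
      exact (hmem4 x).2 (hb x hx)
    have hsubl' : ([1, 2, 3, 4] : List Int) ⊆ (PySem.Set.ofList R) := by
      intro k hk
      exact (PySem.Set.mem_ofList R k).2 (hc k hk)
    have h1 : (PySem.Set.ofList R).length ≤ 4 := (hnodup.subperm hsubl).length_le
    have h2 : 4 ≤ (PySem.Set.ofList R).length := (hnodup4.subperm hsubl').length_le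
    omega

-- ===== VERDICT (by name: the statement is the Claim_ definition above) =====
theorem is_valid_hanoi_state_spec : Claim_equal_is_valid_hanoi_state := by
  intro state _
  unfold Spec_is_valid_hanoi_state is_valid_hanoi_state is_valid_hanoi_state_alt
  by_cases h3 : state.length = 3
  · rw [if_pos h3, if_pos h3, pvAloop_spec]
    have hR : (PySem.List.pyRange 1 5 1) = ([1, 2, 3, 4] : List Int) := by decide
    by_cases hall : state.all (fun peg => decide (peg = PySem.List.sorted peg (fun x => x) true)) = true
    · -- every peg is descending: both sides reduce to the ring condition
      have hord : state.all (fun peg => (peg.zip (peg.drop 1)).all (fun ab => decide (ab.2 ≤ ab.1))) = true := by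
        rw [List.all_eq_true] at hall ⊢
        intro peg hp
        exact (zip_all_iff peg).2 ((peg_sorted_iff peg).1 (by simpa using hall peg hp))
      rw [if_pos hall]
      simp only [hord, Bool.true_and]
      have hupd : PySem.Set.update PySem.Set.empty state.flatten = PySem.Set.ofList state.flatten := by
        simp [PySem.Set.update_nil_left]
      rw [hupd]
      rw [Bool.eq_iff_iff, set_cond_iff]
      constructor
      · rintro ⟨hb, hc⟩
        rw [Bool.and_eq_true]
        constructor
        · rw [List.all_eq_true]
          intro peg hp
          rw [List.all_eq_true]
          intro r hr
          have := hb r (List.mem_flatten.2 ⟨peg, hp, hr⟩)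
          simp only [Bool.and_eq_true, decide_eq_true_eq]; exact this
        · rw [hR, List.all_eq_true]
          intro k hk
          have := hc k hk
          obtain ⟨peg, hp, hkp⟩ := List.mem_flatten.1 this
          rw [List.any_eq_true]
          exact ⟨peg, hp, by simpa using hkp⟩
      · intro h
        rw [Bool.and_eq_true] at h
        obtain ⟨h1, h2⟩ := h
        constructor
        · intro r hr
          obtain ⟨peg, hp, hrp⟩ := List.mem_flatten.1 hr
          have := (List.all_eq_true.1 (List.all_eq_true.1 h1 peg hp)) r hrp
          simpa using this
        · intro k hk
          rw [hR, List.all_eq_true] at h2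
          have := h2 k hk
          rw [List.any_eq_true] at this
          obtain ⟨peg, hp, hkp⟩ := this
          exact List.mem_flatten.2 ⟨peg, hp, by simpa using hkp⟩
    · -- some peg is not descending: both sides are false
      rw [if_neg hall]
      have : state.all (fun peg => (peg.zip (peg.drop 1)).all (fun ab => decide (ab.2 ≤ ab.1))) = false := by
        rw [Bool.eq_false_iff]
        intro hcon
        apply hall
        rw [List.all_eq_true] at hcon ⊢
        intro peg hp
        exact decide_eq_true ((peg_sorted_iff peg).2 ((zip_all_iff peg).1 (hcon peg hp)))
      rw [this]
      simp
  · simp [h3]
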